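-- pv_equiv track=rewrite | github.com/joyvgh/MushroomProject | mushroom.py | make_category_outputs
-- ===== SOURCE A (Python) =====
-- def make_category_outputs(expected_outputs):
--     '''Returns a tuple with the expected outputs for each feature'''
--     setosa_outputs = []
--     versicolor_outputs = []
--     virginica_outputs = []
--     outputs = (setosa_outputs, versicolor_outputs, virginica_outputs)
--     for output in expected_outputs:
--         if output[0] == 1:
--             setosa_outputs.append([1])
--             versicolor_outputs.append([0])
--             virginica_outputs.append([0])
--         elif output[1] == 1:
--             setosa_outputs.append([0])
--             versicolor_outputs.append([1])
--             virginica_outputs.append([0])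
--         else:
--             setosa_outputs.append([0])
--             versicolor_outputs.append([0])
--             virginica_outputs.append([1])
--     return outputs
-- ===== SOURCE B (Python) =====
-- def make_category_outputs(expected_outputs):
--     '''Returns a tuple with the expected outputs for each feature'''
--     setosa = [[1] if o[0] == 1 else [0] for o in expected_outputs]
--     versicolor = [[1] if o[0] != 1 and o[1] == 1 else [0] for o in expected_outputs]
--     virginica = [[1] if o[0] != 1 and o[1] != 1 else [0] for o in expected_outputs]
--     return (setosa, versicolor, virginica)
-- ===== Notes on version B (the rewrite author's own statement) =====
-- stated objective: simpler
-- what changed: Replaces the single interleaved loop appending to three accumulator lists with three independent per-class list comprehensions over expected_outputs, preserving the if/elif precedence via explicit o[0]!=1 guards.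
import Mathlib
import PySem

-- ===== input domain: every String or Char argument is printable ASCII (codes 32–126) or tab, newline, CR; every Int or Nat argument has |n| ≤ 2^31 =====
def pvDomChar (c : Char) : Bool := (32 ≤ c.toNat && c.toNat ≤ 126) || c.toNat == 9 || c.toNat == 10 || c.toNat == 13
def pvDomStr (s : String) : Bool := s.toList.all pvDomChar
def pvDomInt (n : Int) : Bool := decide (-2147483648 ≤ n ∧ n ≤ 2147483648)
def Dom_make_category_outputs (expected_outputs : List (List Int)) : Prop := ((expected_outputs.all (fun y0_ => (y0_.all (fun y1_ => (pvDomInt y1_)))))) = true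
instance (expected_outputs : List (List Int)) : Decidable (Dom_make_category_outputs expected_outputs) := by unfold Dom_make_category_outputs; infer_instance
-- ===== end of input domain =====

-- B replaces A's single interleaved loop (three accumulators) with three independent
-- per-class list comprehensions (maps); objective: simpler, same O(n) cost.


-- ===== PORT A =====
-- one pass appending to three accumulator lists; o[0]/o[1] via pyGet? (getD 0 is only
-- reached outside Pre_, where the Python raises IndexError)
def make_category_outputs (expected_outputs : List (List Int)) : List (List (List Int)) :=
  let st := expected_outputs.foldl
    (fun (acc : List (List Int) × List (List Int) × List (List Int)) output =>
      if (PySem.List.pyGet? output 0).getD 0 = 1 then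
        (acc.1 ++ [[1]], acc.2.1 ++ [[0]], acc.2.2 ++ [[0]])
      else if (PySem.List.pyGet? output 1).getD 0 = 1 then
        (acc.1 ++ [[0]], acc.2.1 ++ [[1]], acc.2.2 ++ [[0]])
      else
        (acc.1 ++ [[0]], acc.2.1 ++ [[0]], acc.2.2 ++ [[1]]))
    ([], [], [])
  [st.1, st.2.1, st.2.2]

-- ===== PORT B =====
-- three independent comprehensions, one per class
def make_category_outputs_alt (expected_outputs : List (List Int)) : List (List (List Int)) :=
  [expected_outputs.map (fun o => if (PySem.List.pyGet? o 0).getD 0 = 1 then [1] else [0]),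
   expected_outputs.map (fun o => if (PySem.List.pyGet? o 0).getD 0 ≠ 1 ∧ (PySem.List.pyGet? o 1).getD 0 = 1 then [1] else [0]),
   expected_outputs.map (fun o => if (PySem.List.pyGet? o 0).getD 0 ≠ 1 ∧ (PySem.List.pyGet? o 1).getD 0 ≠ 1 then [1] else [0])]

-- ===== PRECONDITION & SPEC =====
-- Pre_ excludes exactly the inputs where the Python A raises IndexError: a row that is
-- empty, or has length 1 with first element ≠ 1 (then output[1] is read).
def Pre_make_category_outputs (expected_outputs : List (List Int)) : Prop :=
  ∀ o ∈ expected_outputs, o ≠ [] ∧ (o.headI ≠ 1 → 2 ≤ o.length)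
instance (expected_outputs : List (List Int)) : Decidable (Pre_make_category_outputs expected_outputs) := by unfold Pre_make_category_outputs; infer_instance
def pvWitness_make_category_outputs : List (List Int) := [[1, 0, 0], [0, 1, 0], [0, 0, 1]]
def Spec_make_category_outputs (expected_outputs : List (List Int)) (out : List (List (List Int))) : Prop := out = make_category_outputs_alt expected_outputs
instance (expected_outputs : List (List Int)) (out : List (List (List Int))) : Decidable (Spec_make_category_outputs expected_outputs out) := by unfold Spec_make_category_outputs; infer_instance

-- ===== CLAIM (what is proved, stated in full; the proofs are below) =====
def Claim_equal_make_category_outputs : Prop := ∀ (expected_outputs : List (List Int)), Dom_make_category_outputs expected_outputs → Pre_make_category_outputs expected_outputs → Spec_make_category_outputs expected_outputs (make_category_outputs expected_outputs)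

-- ===== LEMMAS AND PROOFS =====

-- loop invariant: the fold from any accumulator appends the three per-class maps
theorem mco_fold_inv (xs : List (List Int)) (s v g : List (List Int)) :
    xs.foldl
      (fun (acc : List (List Int) × List (List Int) × List (List Int)) output =>
        if (PySem.List.pyGet? output 0).getD 0 = 1 then
          (acc.1 ++ [[1]], acc.2.1 ++ [[0]], acc.2.2 ++ [[0]])
        else if (PySem.List.pyGet? output 1).getD 0 = 1 then
          (acc.1 ++ [[0]], acc.2.1 ++ [[1]], acc.2.2 ++ [[0]])
        else
          (acc.1 ++ [[0]], acc.2.1 ++ [[0]], acc.2.2 ++ [[1]]))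
      (s, v, g)
    = (s ++ xs.map (fun o => if (PySem.List.pyGet? o 0).getD 0 = 1 then [1] else [0]),
       v ++ xs.map (fun o => if (PySem.List.pyGet? o 0).getD 0 ≠ 1 ∧ (PySem.List.pyGet? o 1).getD 0 = 1 then [1] else [0]),
       g ++ xs.map (fun o => if (PySem.List.pyGet? o 0).getD 0 ≠ 1 ∧ (PySem.List.pyGet? o 1).getD 0 ≠ 1 then [1] else [0])) := by
  induction xs generalizing s v g with
  | nil => simp
  | cons o xs ih =>
    by_cases h0 : (PySem.List.pyGet? o 0).getD 0 = 1 <;>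
      by_cases h1 : (PySem.List.pyGet? o 1).getD 0 = 1 <;>
        simp [h0, h1, ih]

-- ===== VERDICT (by name: the statement is the Claim_ definition above) =====
theorem make_category_outputs_spec : Claim_equal_make_category_outputs := by
  intro xs _ _
  unfold Spec_make_category_outputs make_category_outputs make_category_outputs_alt
  simp [mco_fold_inv]
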